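-- pv_equiv track=rewrite | github.com/Sylvester-Ad/ai-with-dsa | next_higher_temperature-02.py | nextHigherTemperature
-- ===== SOURCE A (Python) =====
-- def nextHigherTemperature(
--     readings: list[int],
-- ) -> tuple[list[int], list[int], list[int]]:
--     next_cooler: list[int] = [0] * len(readings)
--     next_warmer: list[int] = [0] * len(readings)
--     cooler_stack: list[int] = []
--     warmer_stack: list[int] = []
--     next_warmest: list[int] = [0] * len(readings)
--     max_index = len(readings) - 1
--
--     for i in range(len(readings) - 1, -1, -1):
--         # Track monotonic decreasing and increasing stacks for next warmer and cooler
--         while warmer_stack and readings[warmer_stack[-1]] <= readings[i]: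
--             warmer_stack.pop()
--
--         while cooler_stack and readings[cooler_stack[-1]] >= readings[i]:
--             cooler_stack.pop()
--
--         if warmer_stack:
--             next_warmer[i] = warmer_stack[-1] - i
--
--         if cooler_stack:
--             next_cooler[i] = cooler_stack[-1] - i
--
--         warmer_stack.append(i)
--         cooler_stack.append(i)
--
--         # Track the next warmest
--         if i == len(readings) - 1:
--
--             continue
--         if readings[i] > readings[max_index]:
--             next_warmest[i] = max_index - i
--             max_index = i
--         else:
--             next_warmest[i] = max_index - i
--
--     return next_warmer, next_cooler, next_warmest
-- ===== SOURCE B (Python) =====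
-- def _first_from(readings, i, pred):
--     # distance to the first index j > i whose reading satisfies pred, else 0
--     for j in range(i + 1, len(readings)):
--         if pred(readings[j]):
--             return j - i
--     return 0
--
--
-- def _rightmost_argmax_after(readings, i):
--     # rightmost index of the maximum reading in readings[i+1:] (requires i+1 < len)
--     best = i + 1
--     for j in range(i + 2, len(readings)):
--         if readings[j] >= readings[best]:
--             best = j
--     return best
--
--
-- def nextHigherTemperature(
--     readings: list[int],
-- ) -> tuple[list[int], list[int], list[int]]:
--     n = len(readings)
--     next_warmer = [_first_from(readings, i, lambda v: v > readings[i]) for i in range(n)]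
--     next_cooler = [_first_from(readings, i, lambda v: v < readings[i]) for i in range(n)]
--     next_warmest = [
--         _rightmost_argmax_after(readings, i) - i if i + 1 < n else 0 for i in range(n)
--     ]
--     return next_warmer, next_cooler, next_warmest
-- ===== Notes on version B (the rewrite author's own statement) =====
-- stated objective: simpler
-- what changed: Replaced the single backward pass with two monotonic stacks and a running argmax by independent per-index forward scans: next_warmer/next_cooler scan right for the first strictly greater/smaller reading, next_warmest scans the suffix for its rightmost argmax.
import Mathlib
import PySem

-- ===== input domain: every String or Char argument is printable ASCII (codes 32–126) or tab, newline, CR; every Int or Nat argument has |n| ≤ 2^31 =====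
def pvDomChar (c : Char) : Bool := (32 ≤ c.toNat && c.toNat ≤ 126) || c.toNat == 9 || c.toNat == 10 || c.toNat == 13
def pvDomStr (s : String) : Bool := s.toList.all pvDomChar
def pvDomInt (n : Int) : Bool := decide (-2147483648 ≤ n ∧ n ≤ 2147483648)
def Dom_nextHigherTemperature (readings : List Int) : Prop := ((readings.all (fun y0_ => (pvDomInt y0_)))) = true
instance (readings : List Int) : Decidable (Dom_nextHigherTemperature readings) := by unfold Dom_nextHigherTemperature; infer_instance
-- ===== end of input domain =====

-- B replaces A's backward monotonic-stack pass by independent forward scans per index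
-- (first strictly warmer / cooler, rightmost argmax of the suffix); simpler, not faster.

-- ===== PORT A =====

def pvGet (r : List Int) (j : Nat) : Int := r.getD j 0

-- state of A's loop: next_warmer, next_cooler, next_warmest, warmer_stack, cooler_stack, max_index
structure StA where
  nw : List Int
  nc : List Int
  nwst : List Int
  ws : List Nat
  cs : List Nat
  mi : Nat
deriving Repr, DecidableEq

-- the 'while stack and readings[stack[-1]] … : stack.pop()' loops (stack head = Python top)
def popWhileA (r : List Int) (p : Int → Bool) : List Nat → List Nat
  | [] => []
  | j :: s => if p (pvGet r j) then popWhileA r p s else j :: s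

-- one iteration of A's 'for i in range(len(readings)-1, -1, -1)' body
def stepA (r : List Int) (n i : Nat) (st : StA) : StA :=
  let ws1 := popWhileA r (fun v => v ≤ pvGet r i) st.ws
  let cs1 := popWhileA r (fun v => v ≥ pvGet r i) st.cs
  let nw := match ws1 with | [] => st.nw | j :: _ => st.nw.set i ((j : Int) - (i : Int))
  let nc := match cs1 with | [] => st.nc | j :: _ => st.nc.set i ((j : Int) - (i : Int))
  let ws := i :: ws1
  let cs := i :: cs1
  if i = n - 1 then
    { st with nw := nw, nc := nc, ws := ws, cs := cs }
  else if pvGet r i > pvGet r st.mi then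
    { nw := nw, nc := nc, nwst := st.nwst.set i ((st.mi : Int) - (i : Int)), ws := ws, cs := cs, mi := i }
  else
    { nw := nw, nc := nc, nwst := st.nwst.set i ((st.mi : Int) - (i : Int)), ws := ws, cs := cs, mi := st.mi }

-- the loop, counting down: loopA r n k st processes i = k-1, k-2, …, 0
def loopA (r : List Int) (n : Nat) : Nat → StA → StA
  | 0, st => st
  | i + 1, st => loopA r n i (stepA r n i st)

def nextHigherTemperature (readings : List Int) : List Int × List Int × List Int :=
  let n := readings.length
  let st := loopA readings n n
    { nw := List.replicate n 0, nc := List.replicate n 0, nwst := List.replicate n 0,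
      ws := [], cs := [], mi := n - 1 }
  (st.nw, st.nc, st.nwst)

-- ===== PORT B =====

-- 'for j in range(i+1, len(readings)): if pred(readings[j]): return j - i' / 'return 0'
def firstFromGo (r : List Int) (p : Int → Bool) (i j : Nat) : Nat → Int
  | 0 => 0
  | fuel + 1 => if p (pvGet r j) then (j : Int) - (i : Int) else firstFromGo r p i (j + 1) fuel

def firstFrom (r : List Int) (i : Nat) (p : Int → Bool) : Int :=
  firstFromGo r p i (i + 1) (r.length - (i + 1))

-- 'best = i+1; for j in range(i+2, n): if readings[j] >= readings[best]: best = j'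
def argmaxGo (r : List Int) (best j : Nat) : Nat → Nat
  | 0 => best
  | fuel + 1 => argmaxGo r (if pvGet r j ≥ pvGet r best then j else best) (j + 1) fuel

def rargmaxAfter (r : List Int) (i : Nat) : Nat :=
  argmaxGo r (i + 1) (i + 2) (r.length - (i + 2))

def nextHigherTemperature_alt (readings : List Int) : List Int × List Int × List Int :=
  let n := readings.length
  ((List.range n).map (fun i => firstFrom readings i (fun v => v > pvGet readings i)),
   (List.range n).map (fun i => firstFrom readings i (fun v => v < pvGet readings i)),
   (List.range n).map (fun i => if i + 1 < n then ((rargmaxAfter readings i : Int) - (i : Int)) else 0))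

-- ===== PRECONDITION & SPEC =====
def Spec_nextHigherTemperature (readings : List Int) (out : List Int × List Int × List Int) : Prop := out = nextHigherTemperature_alt readings
instance (readings : List Int) (out : List Int × List Int × List Int) : Decidable (Spec_nextHigherTemperature readings out) := by unfold Spec_nextHigherTemperature; infer_instance

-- ===== CLAIM (what is proved, stated in full; the proofs are below) =====
def Claim_equal_nextHigherTemperature : Prop := ∀ (readings : List Int), Dom_nextHigherTemperature readings → Spec_nextHigherTemperature readings (nextHigherTemperature readings)

-- ===== LEMMAS AND PROOFS =====

-- the stack A maintains after having processed indices s..n-1: the indices j of [s,n)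
-- such that every reading strictly between s and j is c-below readings[j] (head = top)
def Sstk (r : List Int) (c : Int → Int → Bool) (n s : Nat) : List Nat :=
  (List.range' s (n - s)).filter
    (fun j => (List.range' s (j - s)).all (fun l => c (pvGet r l) (pvGet r j)))

-- the value A's nw / nc / nwst arrays hold at a processed position (B's per-index values)
def wval (r : List Int) (k : Nat) : Int := firstFrom r k (fun v => v > pvGet r k)
def cval (r : List Int) (k : Nat) : Int := firstFrom r k (fun v => v < pvGet r k)
def mval (r : List Int) (k : Nat) : Int := (rargmaxAfter r k : Int) - (k : Int)

-- backward recursion computing the rightmost argmax of [s, s+fuel]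
def RAb (r : List Int) : Nat → Nat → Nat
  | s, 0 => s
  | s, f + 1 => let m := RAb r (s + 1) f; if pvGet r s > pvGet r m then s else m

def InvA (r : List Int) (i : Nat) (st : StA) : Prop :=
  let n := r.length
  st.nw = (List.range n).map (fun k => if i ≤ k then wval r k else 0) ∧
  st.nc = (List.range n).map (fun k => if i ≤ k then cval r k else 0) ∧
  st.nwst = (List.range n).map (fun k => if i ≤ k ∧ k + 1 < n then mval r k else 0) ∧
  st.ws = Sstk r (fun a b => a < b) n i ∧
  st.cs = Sstk r (fun a b => b < a) n i ∧
  st.mi = RAb r (min i (n - 1)) (n - 1 - min i (n - 1))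

lemma popWhileA_eq_dropWhile (r : List Int) (p : Int → Bool) (l : List Nat) :
    popWhileA r p l = l.dropWhile (fun j => p (pvGet r j)) := by
  induction l with
  | nil => rfl
  | cons a t ih => simp [popWhileA, List.dropWhile]; split_ifs with h <;> simp [h, ih]

lemma mem_Sstk (r : List Int) (c : Int → Int → Bool) (n s j : Nat) :
    j ∈ Sstk r c n s ↔ (s ≤ j ∧ j < n) ∧ ∀ l, s ≤ l → l < j → c (pvGet r l) (pvGet r j) = true := by
  unfold Sstk
  rw [List.mem_filter]
  constructor
  · rintro ⟨hmem, hall⟩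
    rw [List.mem_range'_1] at hmem
    refine ⟨⟨hmem.1, by omega⟩, fun l hl1 hl2 => ?_⟩
    exact (List.all_eq_true.1 hall) l (List.mem_range'_1.2 ⟨hl1, by omega⟩)
  · rintro ⟨⟨h1, h2⟩, h3⟩
    refine ⟨List.mem_range'_1.2 ⟨h1, by omega⟩, List.all_eq_true.2 fun l hl => ?_⟩
    rw [List.mem_range'_1] at hl
    exact h3 l hl.1 (by omega)

lemma Sstk_pairwise_idx (r : List Int) (c : Int → Int → Bool) (n s : Nat) :
    (Sstk r c n s).Pairwise (· < ·) :=
  (List.pairwise_lt_range' ..).filter _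

lemma Sstk_pairwise_val (r : List Int) (c : Int → Int → Bool) (n s : Nat) :
    (Sstk r c n s).Pairwise (fun a b => c (pvGet r a) (pvGet r b) = true) := by
  refine (Sstk_pairwise_idx r c n s).imp_of_mem ?_
  intro a b ha hb hab
  rcases (mem_Sstk r c n s a).1 ha with ⟨⟨ha1, _⟩, _⟩
  rcases (mem_Sstk r c n s b).1 hb with ⟨_, h3⟩
  exact h3 a ha1 hab

-- filter = dropWhile when the kept elements form a suffix
lemma filter_eq_dropWhile_not {α : Type} (q : α → Bool) (l : List α)
    (h : l.Pairwise (fun a b => q a = true → q b = true)) :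
    l.filter q = l.dropWhile (fun x => !q x) := by
  induction l with
  | nil => rfl
  | cons a t ih =>
    rcases List.pairwise_cons.1 h with ⟨ha, ht⟩
    by_cases hq : q a = true
    · have hall : ∀ x ∈ t, q x = true := fun x hx => ha x hx hq
      simp [List.filter, List.dropWhile, hq, List.filter_eq_self.2 hall]
    · simp [List.filter, List.dropWhile, hq, ih ht]

lemma Sstk_step (r : List Int) (c : Int → Int → Bool) (n i : Nat)
    (hcT : ∀ a b d : Int, c a b = true → c b d = true → c a d = true)
    (hin : i < n) :
    Sstk r c n i = i :: (Sstk r c n (i + 1)).dropWhile (fun j => !(c (pvGet r i) (pvGet r j))) := by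
  have hsplit : List.range' i (n - i) = i :: List.range' (i + 1) (n - (i + 1)) := by
    rw [show n - i = (n - (i + 1)) + 1 by omega, List.range'_succ]
  rw [Sstk, hsplit, List.filter_cons]
  have hhead : ((List.range' i (i - i)).all (fun l => c (pvGet r l) (pvGet r i))) = true := by
    simp
  rw [if_pos hhead]
  congr 1
  have hcongr : ∀ j ∈ List.range' (i + 1) (n - (i + 1)),
      ((List.range' i (j - i)).all (fun l => c (pvGet r l) (pvGet r j))) =
        (c (pvGet r i) (pvGet r j) && (List.range' (i + 1) (j - (i + 1))).all
          (fun l => c (pvGet r l) (pvGet r j))) := by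
    intro j hj
    rw [List.mem_range'_1] at hj
    rw [show j - i = (j - (i + 1)) + 1 by omega, List.range'_succ, List.all_cons]
  rw [List.filter_congr hcongr]
  have hff : (List.range' (i + 1) (n - (i + 1))).filter
      (fun j => c (pvGet r i) (pvGet r j) && (List.range' (i + 1) (j - (i + 1))).all
        (fun l => c (pvGet r l) (pvGet r j))) =
      (Sstk r c n (i + 1)).filter (fun j => c (pvGet r i) (pvGet r j)) := by
    rw [Sstk, List.filter_filter]
  rw [hff]
  apply filter_eq_dropWhile_not
  exact (Sstk_pairwise_val r c n (i + 1)).imp_of_mem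
    (fun {a b} _ _ hab hqa => hcT _ _ _ hqa hab)

-- every index of [s,n) is dominated by a stack element at or before it
lemma Sstk_dominate (r : List Int) (c : Int → Int → Bool) (n s : Nat)
    (hirr : ∀ a : Int, c a a = false)
    (hcoT : ∀ a b d : Int, c a b = false → c b d = false → c a d = false)
    (j : Nat) (hj1 : s ≤ j) (hj2 : j < n) :
    ∃ m ∈ Sstk r c n s, m ≤ j ∧ c (pvGet r m) (pvGet r j) = false := by
  induction j using Nat.strong_induction_on with
  | _ j ih =>
    by_cases hj : j ∈ Sstk r c n s
    · exact ⟨j, hj, le_refl j, hirr _⟩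
    · have hne := (mem_Sstk r c n s j).not.1 hj
      push_neg at hne
      obtain ⟨l, hl1, hl2, hl3⟩ := hne ⟨hj1, hj2⟩
      have hl3' : c (pvGet r l) (pvGet r j) = false := by
        cases hc : c (pvGet r l) (pvGet r j) with
        | false => rfl
        | true => exact absurd hc hl3
      obtain ⟨m, hm, hml, hmc⟩ := ih l hl2 hl1 (by omega)
      exact ⟨m, hm, by omega, hcoT _ _ _ hmc hl3'⟩

lemma dropWhile_head_false {α : Type} (p : α → Bool) (l : List α) (x : α) (xs : List α)
    (h : l.dropWhile p = x :: xs) : p x = false := by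
  induction l with
  | nil => simp at h
  | cons a t ih =>
    rw [List.dropWhile_cons] at h
    split_ifs at h with hpa
    · exact ih h
    · cases h; simpa using hpa

lemma find?_range'_eq_some (q : Nat → Bool) (s len j : Nat)
    (h1 : q j = true) (h2 : s ≤ j) (h3 : j < s + len)
    (h4 : ∀ l, s ≤ l → l < j → q l = false) :
    (List.range' s len).find? q = some j := by
  induction len generalizing s with
  | zero => omega
  | succ k ih =>
    rw [List.range'_succ]
    by_cases hs : s = j
    · simp [hs, h1]
    · rw [List.find?_cons_of_neg (by simp [h4 s (le_refl s) (by omega)])]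
      exact ih (s + 1) (by omega) (by omega) (fun l hl1 hl2 => h4 l (by omega) hl2)

lemma Sstk_head (r : List Int) (c : Int → Int → Bool) (n i : Nat)
    (hirr : ∀ a : Int, c a a = false)
    (hcoT : ∀ a b d : Int, c a b = false → c b d = false → c a d = false)
    (h4 : ∀ x a b : Int, c x b = true → c a b = false → c x a = true) :
    ((Sstk r c n (i + 1)).dropWhile (fun j => !(c (pvGet r i) (pvGet r j)))).head? =
      (List.range' (i + 1) (n - (i + 1))).find? (fun j => c (pvGet r i) (pvGet r j)) := by
  cases hD : (Sstk r c n (i + 1)).dropWhile (fun j => !(c (pvGet r i) (pvGet r j))) with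
  | nil =>
    rw [List.head?_nil]
    symm
    rw [List.find?_eq_none]
    intro j hj hq
    rw [List.mem_range'_1] at hj
    obtain ⟨m, hm, hml, hmc⟩ := Sstk_dominate r c n (i + 1) hirr hcoT j hj.1 (by omega)
    have hqm : c (pvGet r i) (pvGet r m) = true := h4 _ _ _ hq hmc
    have hmT : m ∈ (Sstk r c n (i + 1)).takeWhile (fun j => !(c (pvGet r i) (pvGet r j))) := by
      have := List.takeWhile_append_dropWhile
        (p := fun j => !(c (pvGet r i) (pvGet r j))) (l := Sstk r c n (i + 1))
      rw [hD, List.append_nil] at this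
      rw [this]; exact hm
    have := List.mem_takeWhile_imp hmT
    simp [hqm] at this
  | cons j0 rest =>
    rw [List.head?_cons]
    symm
    have hsub : List.Sublist (j0 :: rest) (Sstk r c n (i + 1)) := by
      rw [← hD]; exact List.dropWhile_sublist _
    have hj0S : j0 ∈ Sstk r c n (i + 1) := hsub.mem (List.mem_cons_self ..)
    obtain ⟨⟨hj01, hj02⟩, -⟩ := (mem_Sstk r c n (i + 1) j0).1 hj0S
    have hq0 : c (pvGet r i) (pvGet r j0) = true := by
      have := dropWhile_head_false _ _ _ _ hD
      simpa using this
    apply find?_range'_eq_some _ _ _ _ hq0 hj01 (by omega)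
    intro l hl1 hl2
    cases hql : c (pvGet r i) (pvGet r l) with
    | false => rfl
    | true =>
      exfalso
      obtain ⟨m, hm, hml, hmc⟩ := Sstk_dominate r c n (i + 1) hirr hcoT l hl1 (by omega)
      have hqm : c (pvGet r i) (pvGet r m) = true := h4 _ _ _ hql hmc
      have hmlt : m < j0 := by omega
      have hsplit := List.takeWhile_append_dropWhile
        (p := fun j => !(c (pvGet r i) (pvGet r j))) (l := Sstk r c n (i + 1))
      rw [hD] at hsplit
      rcases (by rw [← hsplit] at hm; exact List.mem_append.1 hm) with hmT | hmD
      · have := List.mem_takeWhile_imp hmT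
        simp [hqm] at this
      · have hpw : (j0 :: rest).Pairwise (· < ·) := by
          have := (Sstk_pairwise_idx r c n (i + 1)).sublist hsub
          exact this
        rcases List.mem_cons.1 hmD with h | h
        · omega
        · have := (List.pairwise_cons.1 hpw).1 m h
          omega

lemma firstFromGo_eq_find? (r : List Int) (p : Int → Bool) (i : Nat) :
    ∀ (fuel j : Nat), firstFromGo r p i j fuel =
      match (List.range' j fuel).find? (fun k => p (pvGet r k)) with
      | some k => (k : Int) - (i : Int)
      | none => 0 := by
  intro fuel
  induction fuel with
  | zero => intro j; rfl
  | succ f ih =>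
    intro j
    rw [List.range'_succ, List.find?_cons]
    by_cases h : p (pvGet r j) = true <;> simp [firstFromGo, h, ih]

-- rightmost-argmax characterisation
def IsRArgmax (r : List Int) (s len m : Nat) : Prop :=
  s ≤ m ∧ m < s + len ∧ (∀ j, s ≤ j → j < s + len → pvGet r j ≤ pvGet r m) ∧
    (∀ j, m < j → j < s + len → pvGet r j < pvGet r m)

lemma IsRArgmax_unique (r : List Int) (s len m1 m2 : Nat)
    (h1 : IsRArgmax r s len m1) (h2 : IsRArgmax r s len m2) : m1 = m2 := by
  rcases h1 with ⟨a1, b1, c1, d1⟩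
  rcases h2 with ⟨a2, b2, c2, d2⟩
  by_contra h
  rcases Nat.lt_or_ge m1 m2 with hlt | hge
  · have := d1 m2 hlt b2; have := c2 m1 a1 b1; omega
  · have : m2 < m1 := by omega
    have := d2 m1 this b1; have := c1 m2 a2 b2; omega

lemma RAb_isRArgmax (r : List Int) : ∀ (f s : Nat), IsRArgmax r s (f + 1) (RAb r s f) := by
  intro f
  induction f with
  | zero =>
    intro s
    refine ⟨?_, ?_, ?_, ?_⟩
    · simp [RAb]
    · simp [RAb]
    · intro j h1 h2
      have hj : j = s := by omega
      subst hj
      simp [RAb]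
    · intro j h1 h2
      simp only [RAb] at h1
      omega
  | succ k ih =>
    intro s
    rcases ih (s + 1) with ⟨a1, b1, c1, d1⟩
    simp only [RAb]
    split_ifs with h
    · refine ⟨le_refl s, by omega, ?_, ?_⟩
      · intro j h1 h2
        by_cases hj : j = s
        · simp [hj]
        · have := c1 j (by omega) (by omega); omega
      · intro j h1 h2
        have := c1 j (by omega) (by omega); omega
    · refine ⟨by omega, by omega, ?_, ?_⟩
      · intro j h1 h2
        by_cases hj : j = s
        · simp [hj]; omega
        · exact c1 j (by omega) (by omega)
      · intro j h1 h2
        exact d1 j h1 (by omega)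

lemma argmaxGo_isRArgmax (r : List Int) :
    ∀ (fuel s j best : Nat), IsRArgmax r s (j - s) best → s < j →
      IsRArgmax r s (j - s + fuel) (argmaxGo r best j fuel) := by
  intro fuel
  induction fuel with
  | zero => intro s j best h _; simpa using h
  | succ f ih =>
    intro s j best h hsj
    rcases h with ⟨a1, b1, c1, d1⟩
    simp only [argmaxGo]
    have key : IsRArgmax r s (j + 1 - s) (if pvGet r j ≥ pvGet r best then j else best) := by
      split_ifs with hge
      · refine ⟨by omega, by omega, ?_, fun l h1 h2 => by omega⟩
        intro l h1 h2
        by_cases hl : l = j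
        · simp [hl]
        · have := c1 l h1 (by omega); omega
      · refine ⟨by omega, by omega, ?_, ?_⟩
        · intro l h1 h2
          by_cases hl : l = j
          · simp [hl]; omega
          · exact c1 l h1 (by omega)
        · intro l h1 h2
          by_cases hl : l = j
          · simp [hl]; omega
          · exact d1 l h1 (by omega)
    have := ih s (j + 1) _ key (by omega)
    have heq : j + 1 - s + f = j - s + (f + 1) := by omega
    rwa [heq] at this

lemma rargmaxAfter_eq_RAb (r : List Int) (i : Nat) (h : i + 2 ≤ r.length) :
    rargmaxAfter r i = RAb r (i + 1) (r.length - 1 - (i + 1)) := by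
  have hb : IsRArgmax r (i + 1) ((i + 2) - (i + 1)) (i + 1) := by
    refine ⟨le_refl _, by omega, ?_, ?_⟩
    · intro j h1 h2
      have hj : j = i + 1 := by omega
      subst hj
      exact le_refl _
    · intro j h1 h2
      omega
  have h1 := argmaxGo_isRArgmax r (r.length - (i + 2)) (i + 1) (i + 2) (i + 1) hb (by omega)
  have h2 := RAb_isRArgmax r (r.length - 1 - (i + 1)) (i + 1)
  have hlen : (i + 2) - (i + 1) + (r.length - (i + 2)) = (r.length - 1 - (i + 1)) + 1 := by omega
  rw [hlen] at h1
  exact IsRArgmax_unique r (i + 1) _ _ _ h1 h2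

lemma map_range_set (n i : Nat) (f : Nat → Int) (v : Int) :
    ((List.range n).map f).set i v =
      (List.range n).map (fun k => if k = i then v else f k) := by
  apply List.ext_getElem
  · simp
  · intro k h1 h2
    simp only [List.getElem_set, List.getElem_map, List.getElem_range]
    by_cases h : i = k
    · rw [if_pos h, if_pos h.symm]
    · rw [if_neg h, if_neg (fun hh => h hh.symm)]

lemma step_inv (r : List Int) (i : Nat) (hi : i < r.length) (st : StA)
    (h : InvA r (i + 1) st) : InvA r i (stepA r r.length i st) := by
  obtain ⟨hnw, hnc, hnwst, hws, hcs, hmi⟩ := h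
  have hpredW : (fun j => decide (pvGet r j ≤ pvGet r i)) =
      (fun j : Nat => !decide (pvGet r i < pvGet r j)) := by
    funext j
    rcases lt_or_ge (pvGet r i) (pvGet r j) with hlt | hge
    · rw [decide_eq_false (by omega), decide_eq_true hlt]; rfl
    · rw [decide_eq_true (by omega : pvGet r j ≤ pvGet r i), decide_eq_false (by omega)]; rfl
  have hpredC : (fun j => decide (pvGet r j ≥ pvGet r i)) =
      (fun j : Nat => !decide (pvGet r j < pvGet r i)) := by
    funext j
    rcases lt_or_ge (pvGet r j) (pvGet r i) with hlt | hge
    · rw [decide_eq_false (by omega), decide_eq_true hlt]; rfl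
    · rw [decide_eq_true (by omega : pvGet r j ≥ pvGet r i), decide_eq_false (by omega)]; rfl
  have hWstep : Sstk r (fun a b : Int => decide (a < b)) r.length i
      = i :: (Sstk r (fun a b : Int => decide (a < b)) r.length (i + 1)).dropWhile
          (fun j => !decide (pvGet r i < pvGet r j)) :=
    Sstk_step r _ r.length i
      (by intro a b d h1 h2; simp only [decide_eq_true_eq] at *; omega) hi
  have hCstep : Sstk r (fun a b : Int => decide (b < a)) r.length i
      = i :: (Sstk r (fun a b : Int => decide (b < a)) r.length (i + 1)).dropWhile
          (fun j => !decide (pvGet r j < pvGet r i)) :=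
    Sstk_step r _ r.length i
      (by intro a b d h1 h2; simp only [decide_eq_true_eq] at *; omega) hi
  have hWhead : ((Sstk r (fun a b : Int => decide (a < b)) r.length (i + 1)).dropWhile
      (fun j => !decide (pvGet r i < pvGet r j))).head?
      = (List.range' (i + 1) (r.length - (i + 1))).find? (fun j => decide (pvGet r i < pvGet r j)) :=
    Sstk_head r (fun a b : Int => decide (a < b)) r.length i
      (by intro a; simp only [decide_eq_false_iff_not]; omega)
      (by intro a b d h1 h2; simp only [decide_eq_false_iff_not] at *; omega)
      (by intro x a b h1 h2
          exact decide_eq_true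
            (by have := of_decide_eq_true h1; have := of_decide_eq_false h2; omega))
  have hChead : ((Sstk r (fun a b : Int => decide (b < a)) r.length (i + 1)).dropWhile
      (fun j => !decide (pvGet r j < pvGet r i))).head?
      = (List.range' (i + 1) (r.length - (i + 1))).find? (fun j => decide (pvGet r j < pvGet r i)) :=
    Sstk_head r (fun a b : Int => decide (b < a)) r.length i
      (by intro a; simp only [decide_eq_false_iff_not]; omega)
      (by intro a b d h1 h2; simp only [decide_eq_false_iff_not] at *; omega)
      (by intro x a b h1 h2
          exact decide_eq_true
            (by have := of_decide_eq_true h1; have := of_decide_eq_false h2; omega))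
  have hwvali : wval r i = (match (List.range' (i + 1) (r.length - (i + 1))).find?
      (fun j => decide (pvGet r i < pvGet r j)) with
      | some k => (k : Int) - (i : Int) | none => 0) := by
    unfold wval firstFrom
    rw [firstFromGo_eq_find?]
  have hcvali : cval r i = (match (List.range' (i + 1) (r.length - (i + 1))).find?
      (fun j => decide (pvGet r j < pvGet r i)) with
      | some k => (k : Int) - (i : Int) | none => 0) := by
    unfold cval firstFrom
    rw [firstFromGo_eq_find?]
  -- the warmer / cooler array fields
  have Hnw : (match (Sstk r (fun a b : Int => decide (a < b)) r.length (i + 1)).dropWhile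
        (fun j => !decide (pvGet r i < pvGet r j)) with
      | [] => st.nw | j :: _ => st.nw.set i ((j : Int) - (i : Int))) =
      (List.range r.length).map (fun k => if i ≤ k then wval r k else 0) := by
    rcases hDW : (Sstk r (fun a b : Int => decide (a < b)) r.length (i + 1)).dropWhile
        (fun j => !decide (pvGet r i < pvGet r j)) with _ | ⟨j0, rest⟩
    · have hfind : (List.range' (i + 1) (r.length - (i + 1))).find?
          (fun j => decide (pvGet r i < pvGet r j)) = none := by
        rw [← hWhead, hDW]; rfl
      have hv0 : wval r i = 0 := by rw [hwvali, hfind]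
      rw [hnw]
      refine List.map_congr_left fun k hk => ?_
      rw [List.mem_range] at hk
      by_cases hki : k = i
      · subst hki
        rw [if_neg (by omega), if_pos (le_refl k), hv0]
      · split_ifs <;> first | rfl | (exfalso; omega)
    · have hfind : (List.range' (i + 1) (r.length - (i + 1))).find?
          (fun j => decide (pvGet r i < pvGet r j)) = some j0 := by
        rw [← hWhead, hDW]; rfl
      have hv0 : wval r i = (j0 : Int) - (i : Int) := by rw [hwvali, hfind]
      change st.nw.set i ((j0 : Int) - (i : Int)) = _
      rw [hnw, map_range_set]
      refine List.map_congr_left fun k hk => ?_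
      rw [List.mem_range] at hk
      by_cases hki : k = i
      · subst hki
        rw [if_pos rfl, if_pos (le_refl k), hv0]
      · rw [if_neg hki]
        split_ifs <;> first | rfl | (exfalso; omega)
  have Hnc : (match (Sstk r (fun a b : Int => decide (b < a)) r.length (i + 1)).dropWhile
        (fun j => !decide (pvGet r j < pvGet r i)) with
      | [] => st.nc | j :: _ => st.nc.set i ((j : Int) - (i : Int))) =
      (List.range r.length).map (fun k => if i ≤ k then cval r k else 0) := by
    rcases hDC : (Sstk r (fun a b : Int => decide (b < a)) r.length (i + 1)).dropWhile
        (fun j => !decide (pvGet r j < pvGet r i)) with _ | ⟨j0, rest⟩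
    · have hfind : (List.range' (i + 1) (r.length - (i + 1))).find?
          (fun j => decide (pvGet r j < pvGet r i)) = none := by
        rw [← hChead, hDC]; rfl
      have hv0 : cval r i = 0 := by rw [hcvali, hfind]
      rw [hnc]
      refine List.map_congr_left fun k hk => ?_
      rw [List.mem_range] at hk
      by_cases hki : k = i
      · subst hki
        rw [if_neg (by omega), if_pos (le_refl k), hv0]
      · split_ifs <;> first | rfl | (exfalso; omega)
    · have hfind : (List.range' (i + 1) (r.length - (i + 1))).find?
          (fun j => decide (pvGet r j < pvGet r i)) = some j0 := by
        rw [← hChead, hDC]; rfl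
      have hv0 : cval r i = (j0 : Int) - (i : Int) := by rw [hcvali, hfind]
      change st.nc.set i ((j0 : Int) - (i : Int)) = _
      rw [hnc, map_range_set]
      refine List.map_congr_left fun k hk => ?_
      rw [List.mem_range] at hk
      by_cases hki : k = i
      · subst hki
        rw [if_pos rfl, if_pos (le_refl k), hv0]
      · rw [if_neg hki]
        split_ifs <;> first | rfl | (exfalso; omega)
  have Hws : (i :: (Sstk r (fun a b : Int => decide (a < b)) r.length (i + 1)).dropWhile
      (fun j => !decide (pvGet r i < pvGet r j))) =
      Sstk r (fun a b : Int => decide (a < b)) r.length i := hWstep.symm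
  have Hcs : (i :: (Sstk r (fun a b : Int => decide (b < a)) r.length (i + 1)).dropWhile
      (fun j => !decide (pvGet r j < pvGet r i))) =
      Sstk r (fun a b : Int => decide (b < a)) r.length i := hCstep.symm
  unfold stepA InvA
  simp only [hws, hcs, popWhileA_eq_dropWhile, hpredW, hpredC]
  by_cases hlast : i = r.length - 1
  · rw [if_pos hlast]
    have Hnwst : st.nwst =
        (List.range r.length).map (fun k => if i ≤ k ∧ k + 1 < r.length then mval r k else 0) := by
      rw [hnwst]
      refine List.map_congr_left fun k hk => ?_
      rw [List.mem_range] at hk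
      split_ifs <;> first | rfl | (exfalso; omega)
    have Hmi : st.mi = RAb r (min i (r.length - 1)) (r.length - 1 - min i (r.length - 1)) := by
      rw [hmi, show min (i + 1) (r.length - 1) = min i (r.length - 1) by omega]
    exact ⟨Hnw, Hnc, Hnwst, Hws, Hcs, Hmi⟩
  · rw [if_neg hlast]
    have hi2 : i + 2 ≤ r.length := by omega
    have hmi' : st.mi = RAb r (i + 1) (r.length - 1 - (i + 1)) := by
      rw [hmi, show min (i + 1) (r.length - 1) = i + 1 by omega]
    have Hnwst : st.nwst.set i ((st.mi : Int) - (i : Int)) =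
        (List.range r.length).map (fun k => if i ≤ k ∧ k + 1 < r.length then mval r k else 0) := by
      have hvm : (st.mi : Int) - (i : Int) = mval r i := by
        rw [hmi', mval, rargmaxAfter_eq_RAb r i hi2]
      rw [hnwst, map_range_set, hvm]
      refine List.map_congr_left fun k hk => ?_
      rw [List.mem_range] at hk
      by_cases hki : k = i
      · subst hki
        rw [if_pos rfl, if_pos (by omega)]
      · rw [if_neg hki]
        split_ifs <;> first | rfl | (exfalso; omega)
    have hRAi : RAb r (min i (r.length - 1)) (r.length - 1 - min i (r.length - 1)) =
        (if pvGet r i > pvGet r (RAb r (i + 1) (r.length - 1 - (i + 1))) then i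
         else RAb r (i + 1) (r.length - 1 - (i + 1))) := by
      rw [show min i (r.length - 1) = i by omega,
          show r.length - 1 - i = (r.length - 1 - (i + 1)) + 1 by omega]
      rfl
    by_cases hgt : pvGet r i > pvGet r st.mi
    · rw [if_pos hgt]
      refine ⟨Hnw, Hnc, Hnwst, Hws, Hcs, ?_⟩
      show i = _
      rw [hRAi, if_pos (by rw [← hmi']; exact hgt)]
    · rw [if_neg hgt]
      refine ⟨Hnw, Hnc, Hnwst, Hws, Hcs, ?_⟩
      show st.mi = _
      rw [hRAi, if_neg (by rw [← hmi']; exact hgt), hmi']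

lemma loop_inv (r : List Int) : ∀ (i : Nat), i ≤ r.length → ∀ st, InvA r i st →
    InvA r 0 (loopA r r.length i st) := by
  intro i
  induction i with
  | zero => intro _ st h; exact h
  | succ k ih =>
    intro hk st h
    exact ih (by omega) _ (step_inv r k (by omega) st h)

-- ===== VERDICT (by name: the statement is the Claim_ definition above) =====
theorem nextHigherTemperature_spec : Claim_equal_nextHigherTemperature := by
  intro readings _
  unfold Spec_nextHigherTemperature
  have hinit : InvA readings readings.length
      { nw := List.replicate readings.length 0, nc := List.replicate readings.length 0,
        nwst := List.replicate readings.length 0, ws := [], cs := [],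
        mi := readings.length - 1 } := by
    refine ⟨?_, ?_, ?_, ?_, ?_, ?_⟩
    · rw [List.map_congr_left (g := fun _ => (0 : Int)) (fun k hk => by
        rw [List.mem_range] at hk; rw [if_neg (by omega)])]
      simp
    · rw [List.map_congr_left (g := fun _ => (0 : Int)) (fun k hk => by
        rw [List.mem_range] at hk; rw [if_neg (by omega)])]
      simp
    · rw [List.map_congr_left (g := fun _ => (0 : Int)) (fun k hk => by
        rw [List.mem_range] at hk; rw [if_neg (by omega)])]
      simp
    · show _ = Sstk readings _ readings.length readings.length
      unfold Sstk
      rw [Nat.sub_self]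
      rfl
    · show _ = Sstk readings _ readings.length readings.length
      unfold Sstk
      rw [Nat.sub_self]
      rfl
    · show readings.length - 1 = _
      rw [show min readings.length (readings.length - 1) = readings.length - 1 by omega,
          Nat.sub_self]
      rfl
  have hfin := loop_inv readings readings.length (le_refl _) _ hinit
  obtain ⟨h1, h2, h3, -, -, -⟩ := hfin
  simp only [nextHigherTemperature, nextHigherTemperature_alt]
  refine Prod.ext ?_ (Prod.ext ?_ ?_)
  · show (loopA readings readings.length readings.length _).nw = _
    rw [h1]
    exact List.map_congr_left fun k hk => by rw [if_pos (Nat.zero_le k)]; rfl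
  · show (loopA readings readings.length readings.length _).nc = _
    rw [h2]
    exact List.map_congr_left fun k hk => by rw [if_pos (Nat.zero_le k)]; rfl
  · show (loopA readings readings.length readings.length _).nwst = _
    rw [h3]
    refine List.map_congr_left fun k hk => ?_
    by_cases hkn : k + 1 < readings.length
    · rw [if_pos ⟨Nat.zero_le k, hkn⟩, if_pos hkn]; rfl
    · rw [if_neg (by tauto), if_neg hkn]
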